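-- pv_equiv track=rewrite | github.com/marketagents-ai/MarketAgents | datagenie/src/sharegpt.py | process_conversation
-- ===== SOURCE A (Python) =====
-- def process_conversation(conversations):
--     processed = []
--     current_tool_response = ""
--
--     for i, message in enumerate(conversations):
--         if message['from'] == 'tool':
--             current_tool_response += message['value']
--
--             # Check if next message is not a tool or if this is the last message
--             if i == len(conversations) - 1 or conversations[i+1]['from'] != 'tool':
--                 processed.append({
--                     'from': 'tool',
--                     'value': current_tool_response.strip()
--                 })
--                 current_tool_response = ""
--         else:
--             processed.append(message)
--
--     return processed
-- ===== SOURCE B (Python) =====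
-- def process_conversation(conversations):
--     # Run-based rewrite: scan each maximal run of consecutive tool messages at
--     # once and emit a single merged entry for it, instead of threading a
--     # running accumulator string with a one-message lookahead.
--     processed = []
--     n = len(conversations)
--     i = 0
--     while i < n:
--         msg = conversations[i]
--         if msg['from'] == 'tool':
--             j = i
--             while j < n and conversations[j]['from'] == 'tool':
--                 j += 1
--             value = ''.join(m['value'] for m in conversations[i:j]).strip()
--             processed.append({'from': 'tool', 'value': value})
--             i = j
--         else:
--             processed.append(msg)
--             i += 1
--     return processed
-- ===== Notes on version B (the rewrite author's own statement) =====
-- stated objective: alternative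
-- what changed: B finds each maximal run of consecutive tool messages with an inner scan and emits one merged entry per run, replacing A's single pass that threads a running accumulator string and a one-message index lookahead.
import Mathlib
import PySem

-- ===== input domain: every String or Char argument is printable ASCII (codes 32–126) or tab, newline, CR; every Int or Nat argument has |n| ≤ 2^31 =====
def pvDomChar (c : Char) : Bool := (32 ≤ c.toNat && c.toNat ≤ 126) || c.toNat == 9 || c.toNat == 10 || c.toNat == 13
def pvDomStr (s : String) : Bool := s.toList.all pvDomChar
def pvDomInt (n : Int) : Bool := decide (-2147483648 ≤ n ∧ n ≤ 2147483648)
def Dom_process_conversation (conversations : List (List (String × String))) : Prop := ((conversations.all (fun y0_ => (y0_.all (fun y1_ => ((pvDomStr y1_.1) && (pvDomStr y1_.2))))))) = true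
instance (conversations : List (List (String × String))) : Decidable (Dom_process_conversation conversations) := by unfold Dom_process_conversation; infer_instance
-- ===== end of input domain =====

-- B merges each maximal run of consecutive tool messages in one inner scan instead of
-- A's accumulator-string-plus-lookahead single pass; same return value (alternative, not faster).

-- message['from'] and message['value'] as dict lookups (KeyError inputs excluded by Pre_)
def pcFrom (m : List (String × String)) : String := (PySem.Dict.mk m).getD "from" ""
def pcVal (m : List (String × String)) : String := (PySem.Dict.mk m).getD "value" ""

-- ===== PORT A =====
-- A's for-loop as structural recursion over the remaining messages with the running
-- accumulator string `cur`; `i == len(conversations) - 1` becomes `rest = []` and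
-- `conversations[i+1]` the head of `rest`.
def pcGoA : List (List (String × String)) → String → List (List (String × String))
  | [], _ => []
  | m :: rest, cur =>
    if pcFrom m == "tool" then
      let cur' := cur ++ pcVal m
      if (match rest with
          | [] => true
          | r :: _ => pcFrom r != "tool") then
        [("from", "tool"), ("value", PySem.Str.strip cur')] :: pcGoA rest ""
      else
        pcGoA rest cur'
    else
      m :: pcGoA rest cur

def process_conversation (conversations : List (List (String × String))) : List (List (String × String)) :=
  pcGoA conversations ""

-- ===== PORT B =====
def pcIsTool (m : List (String × String)) : Bool := pcFrom m == "tool"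

-- Source B's outer while as recursion on the remaining messages; the inner `while j < n …`
-- scan of a tool run is takeWhile/dropWhile, ''.join over the run is PySem.Str.join.
def process_conversation_alt : List (List (String × String)) → List (List (String × String))
  | [] => []
  | m :: rest =>
    if _h : pcIsTool m = true then
      [("from", "tool"),
       ("value", PySem.Str.strip (PySem.Str.join "" (((m :: rest).takeWhile pcIsTool).map pcVal)))]
        :: process_conversation_alt ((m :: rest).dropWhile pcIsTool)
    else
      m :: process_conversation_alt rest
termination_by cs => cs.length
decreasing_by
  · simp [_h]
    exact List.length_dropWhile_le pcIsTool rest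
  · simp

-- ===== PRECONDITION & SPEC =====
-- Pre_ excludes exactly the inputs on which the Python A raises KeyError: a message
-- without a 'from' key, or a tool message without a 'value' key.
def Pre_process_conversation (conversations : List (List (String × String))) : Prop :=
  ∀ m ∈ conversations, ((PySem.Dict.mk m).get? "from").isSome = true ∧
    ((PySem.Dict.mk m).get? "from" = some "tool" → ((PySem.Dict.mk m).get? "value").isSome = true)
instance (conversations : List (List (String × String))) : Decidable (Pre_process_conversation conversations) := by
  unfold Pre_process_conversation; infer_instance

def pvWitness_process_conversation : (List (List (String × String))) :=
  [[("from", "human"), ("value", "hi")],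
   [("from", "tool"), ("value", " a ")],
   [("from", "tool"), ("value", "b ")],
   [("from", "gpt"), ("value", "ok")]]

def Spec_process_conversation (conversations : List (List (String × String))) (out : List (List (String × String))) : Prop := out = process_conversation_alt conversations
instance (conversations : List (List (String × String))) (out : List (List (String × String))) : Decidable (Spec_process_conversation conversations out) := by unfold Spec_process_conversation; infer_instance

-- ===== CLAIM (what is proved, stated in full; the proofs are below) =====
def Claim_equal_process_conversation : Prop := ∀ (conversations : List (List (String × String))), Dom_process_conversation conversations → Pre_process_conversation conversations → Spec_process_conversation conversations (process_conversation conversations)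

-- ===== LEMMAS AND PROOFS =====

theorem pc_join_nil_cons (a : List Char) (rest : List (List Char)) :
    PySem.Chars.join [] (a :: rest) = a ++ PySem.Chars.join [] rest := by
  cases rest with
  | nil => simp [PySem.Chars.join_singleton, PySem.Chars.join_nil]
  | cons b t => simpa using PySem.Chars.join_cons_cons [] a b t

theorem pc_str_join_cons (s : String) (ss : List String) :
    PySem.Str.join "" (s :: ss) = s ++ PySem.Str.join "" ss := by
  simp [PySem.Str.join, pc_join_nil_cons]

theorem pc_str_join_nil : PySem.Str.join "" ([] : List String) = "" := by
  simp [PySem.Str.join, PySem.Chars.join_nil]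

-- A's pass over a (prefix of a) tool run with accumulator `cur` produces the merged
-- entry for the whole run and continues after the run with an empty accumulator.
theorem pcGoA_tool_run (rest : List (List (String × String))) :
    ∀ (m : List (String × String)) (cur : String), pcIsTool m = true →
      pcGoA (m :: rest) cur =
        [("from", "tool"),
         ("value", PySem.Str.strip (cur ++ PySem.Str.join "" (((m :: rest).takeWhile pcIsTool).map pcVal)))]
          :: pcGoA ((m :: rest).dropWhile pcIsTool) "" := by
  induction rest with
  | nil =>
    intro m cur hm
    simp only [pcIsTool] at hm
    simp [pcGoA, hm, pcIsTool, pc_str_join_cons, pc_str_join_nil]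
  | cons r rs ih =>
    intro m cur hm
    have hm' := hm; simp only [pcIsTool] at hm'
    by_cases hr : pcIsTool r = true
    · have hr' := hr; simp only [pcIsTool] at hr'
      have step : pcGoA (m :: r :: rs) cur = pcGoA (r :: rs) (cur ++ pcVal m) := by
        simp [pcGoA, hm', bne, hr']
      have htake : (m :: r :: rs).takeWhile pcIsTool = m :: (r :: rs).takeWhile pcIsTool := by
        simp [List.takeWhile_cons, hm]
      have hdrop : (m :: r :: rs).dropWhile pcIsTool = (r :: rs).dropWhile pcIsTool := by
        simp [hm]
      rw [step, ih r (cur ++ pcVal m) hr, htake, hdrop, List.map_cons, pc_str_join_cons,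
          ← String.append_assoc]
    · have hr' : (pcFrom r == "tool") = false := by
        simpa [pcIsTool] using hr
      have hne : (pcFrom r != "tool") = true := by simp [bne, hr']
      have htake : (m :: r :: rs).takeWhile pcIsTool = [m] := by
        simp [hm, hr]
      have hdrop : (m :: r :: rs).dropWhile pcIsTool = r :: rs := by
        simp [hm, hr]
      rw [htake, hdrop, List.map_cons, List.map_nil, pc_str_join_cons, pc_str_join_nil]
      simp [pcGoA, hm', hne]

theorem pcGoA_eq_alt : ∀ (n : Nat) (cs : List (List (String × String))), cs.length ≤ n →
    pcGoA cs "" = process_conversation_alt cs := by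
  intro n
  induction n with
  | zero =>
    intro cs hlen
    have : cs = [] := List.eq_nil_of_length_eq_zero (Nat.le_zero.mp hlen)
    subst this
    simp [pcGoA, process_conversation_alt]
  | succ n ih =>
    intro cs hlen
    cases cs with
    | nil => simp [pcGoA, process_conversation_alt]
    | cons m rest =>
      by_cases hm : pcIsTool m = true
      · rw [pcGoA_tool_run rest m "" hm]
        have hdrop : (m :: rest).dropWhile pcIsTool = rest.dropWhile pcIsTool := by
          simp [hm]
        rw [process_conversation_alt, dif_pos hm, hdrop,
            ih _ (le_trans (List.length_dropWhile_le pcIsTool rest) (Nat.le_of_succ_le_succ hlen))]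
        simp
      · have hm' : (pcFrom m == "tool") = false := by
          simpa [pcIsTool] using hm
        have step : pcGoA (m :: rest) "" = m :: pcGoA rest "" := by simp [pcGoA, hm']
        rw [step, ih rest (Nat.le_of_succ_le_succ hlen), process_conversation_alt, dif_neg hm]

-- ===== VERDICT (by name: the statement is the Claim_ definition above) =====
theorem process_conversation_spec : Claim_equal_process_conversation := by
  intro conversations _ _
  unfold Spec_process_conversation process_conversation
  exact pcGoA_eq_alt conversations.length conversations (Nat.le_refl _)
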